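-- pv_equiv track=rewrite | github.com/hcheorii/programmers_algorithm | lev_1/문자열 내림차순으로 배치하기/main.py | solution
-- ===== SOURCE A (Python) =====
-- def solution(s):
--     answer = ''
--     tmp = list(s)
--     big = []
--     small = []
--
--     for i in range(len(tmp)):
--         if(tmp[i].isupper() == True):
--             big.append(tmp[i])
--         else:
--             small.append(tmp[i])
--     big.sort(reverse = True)
--     small.sort(reverse = True)
--
--     answer = ''.join(small + big)
--
--     return answer
-- ===== SOURCE B (Python) =====
-- def solution(s):
--     # Counting sort over the fixed ASCII alphabet (codes 0..127): emit each code's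
--     # occurrences in descending code order, non-uppercase block first, then A-Z.
--     cs = list(s)
--     out = []
--     for code in range(127, -1, -1):
--         c = chr(code)
--         if not c.isupper():
--             out.extend([c] * cs.count(c))
--     for code in range(90, 64, -1):
--         c = chr(code)
--         out.extend([c] * cs.count(c))
--     return ''.join(out)
-- ===== Notes on version B (the rewrite author's own statement) =====
-- stated objective: alternative
-- what changed: Replaces the two comparison sorts (sort the non-uppercase and uppercase blocks with reverse=True) by a counting sort over the fixed ASCII alphabet: per-code occurrence counts emitted in descending code order, non-uppercase block first, then Z..A.
import Mathlib
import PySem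

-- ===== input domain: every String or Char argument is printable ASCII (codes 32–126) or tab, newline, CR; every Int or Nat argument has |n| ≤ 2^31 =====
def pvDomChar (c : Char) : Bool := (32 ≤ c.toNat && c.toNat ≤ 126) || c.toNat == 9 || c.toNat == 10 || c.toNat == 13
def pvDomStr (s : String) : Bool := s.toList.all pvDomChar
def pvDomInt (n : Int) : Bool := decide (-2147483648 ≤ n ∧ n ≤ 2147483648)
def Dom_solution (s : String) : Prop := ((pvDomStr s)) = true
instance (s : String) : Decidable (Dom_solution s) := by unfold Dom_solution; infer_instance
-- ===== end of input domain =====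

-- B replaces the two comparison sorts by a counting sort over the fixed ASCII alphabet: emit each
-- code's occurrences in descending code order, non-uppercase block first, then Z..A.

-- ===== PORT A =====
def solution (s : String) : String :=
  let tmp := s.toList
  let p := (PySem.List.pyRange 0 (PySem.List.len tmp)).foldl
    (fun (bs : List Char × List Char) i =>
      (fun c => if PySem.Chars.isupper c = true then (bs.1 ++ [c], bs.2) else (bs.1, bs.2 ++ [c]))
        (PySem.List.pyGetD tmp i ' '))
    ([], [])
  let big := PySem.List.sorted p.1 (fun c => c) true
  let small := PySem.List.sorted p.2 (fun c => c) true
  String.mk (small ++ big)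

-- ===== PORT B =====
def solution_alt (s : String) : String :=
  let cs := s.toList
  let out1 := (PySem.List.pyRange 127 (-1) (-1)).foldl
    (fun acc code =>
      let c := Char.ofNat code.toNat
      if (!PySem.Chars.isupper c) = true then acc ++ List.replicate (PySem.List.count cs c) c else acc) []
  let out2 := (PySem.List.pyRange 90 64 (-1)).foldl
    (fun acc code =>
      let c := Char.ofNat code.toNat
      acc ++ List.replicate (PySem.List.count cs c) c) out1
  String.mk out2

-- ===== PRECONDITION & SPEC =====
def Spec_solution (s : String) (out : String) : Prop := out = solution_alt s
instance (s : String) (out : String) : Decidable (Spec_solution s out) := by unfold Spec_solution; infer_instance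

-- ===== CLAIM (what is proved, stated in full; the proofs are below) =====
def Claim_equal_solution : Prop := ∀ (s : String), Dom_solution s → Spec_solution s (solution s)

-- ===== LEMMAS AND PROOFS =====

theorem pv_char_toNat_injective : Function.Injective (fun c : Char => c.toNat) := by
  intro a b h
  have : Char.ofNat a.toNat = Char.ofNat b.toNat := by simp_all
  simpa [Char.ofNat_toNat] using this

theorem pv_key_injective : Function.Injective (fun c : Char => -((c.toNat : Int))) := by
  intro a b h
  apply pv_char_toNat_injective
  simp only [neg_inj, Nat.cast_inj] at h
  exact h

theorem pv_partition_foldl (l : List Char) (b s : List Char) :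
    l.foldl (fun (bs : List Char × List Char) c =>
        if PySem.Chars.isupper c = true then (bs.1 ++ [c], bs.2) else (bs.1, bs.2 ++ [c])) (b, s)
    = (b ++ l.filter (fun c => PySem.Chars.isupper c),
       s ++ l.filter (fun c => !PySem.Chars.isupper c)) := by
  induction l generalizing b s with
  | nil => simp
  | cons x xs ih =>
    simp only [List.foldl_cons, List.filter_cons]
    by_cases h : PySem.Chars.isupper x = true <;> simp [h, ih]

theorem pv_foldl_append_if_flatMap {α β : Type} (p : α → Bool) (g : α → List β)
    (l : List α) (acc : List β) :
    l.foldl (fun acc x => if p x = true then acc ++ g x else acc) acc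
    = acc ++ (l.filter p).flatMap g := by
  induction l generalizing acc with
  | nil => simp
  | cons x xs ih =>
    simp only [List.foldl_cons, List.filter_cons]
    by_cases h : p x = true <;> simp [h, ih]

theorem pv_toNat_ofNat (k : Nat) (hk : k < 128) : (Char.ofNat k).toNat = k := by
  have : k.isValidChar := Or.inl (by omega)
  simp [Char.ofNat, this]

theorem pv_count_flatMap (cs : List Char) (x : Char) (codes : List Nat)
    (hnd : codes.Nodup) (hlt : ∀ k ∈ codes, k < 128) :
    ((codes.flatMap fun k => List.replicate (PySem.List.count cs (Char.ofNat k)) (Char.ofNat k)).count x)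
    = if x.toNat ∈ codes then PySem.List.count cs x else 0 := by
  induction codes with
  | nil => simp
  | cons k ks ih =>
    have hk : k < 128 := hlt k (by simp)
    have hks : ∀ j ∈ ks, j < 128 := fun j hj => hlt j (by simp [hj])
    have hndk : ks.Nodup := hnd.of_cons
    have hknot : k ∉ ks := (List.nodup_cons.mp hnd).1
    have htn : (Char.ofNat k).toNat = k := pv_toNat_ofNat k hk
    simp only [List.flatMap_cons, List.count_append, List.count_replicate, ih hndk hks]
    by_cases hx : x = Char.ofNat k
    · subst hx
      simp [htn, hknot]
    · have hne : x.toNat ≠ k := by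
        intro h
        apply hx
        have := congrArg Char.ofNat h
        simpa [Char.ofNat_toNat, htn] using this
      have hxk : ¬ (Char.ofNat k = x) := fun h => hx h.symm
      simp [List.mem_cons, hne, hxk]

theorem pv_pairwise_flatMap (cs : List Char) (codes : List Nat)
    (hp : codes.Pairwise (· > ·)) (hlt : ∀ k ∈ codes, k < 128) :
    List.Pairwise (fun a b : Char => -((a.toNat : Int)) ≤ -((b.toNat : Int)))
      (codes.flatMap fun k => List.replicate (PySem.List.count cs (Char.ofNat k)) (Char.ofNat k)) := by
  rw [List.pairwise_flatMap]
  constructor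
  · intro k _
    exact List.pairwise_replicate.mpr (Or.inr (le_refl _))
  · refine hp.imp_of_mem ?_
    intro k j hk hj hgt x hx y hy
    have hxe := List.eq_of_mem_replicate hx
    have hye := List.eq_of_mem_replicate hy
    subst hxe; subst hye
    have h1 : (Char.ofNat k).toNat = k := pv_toNat_ofNat k (hlt k hk)
    have h2 : (Char.ofNat j).toNat = j := pv_toNat_ofNat j (hlt j hj)
    rw [h1, h2]
    omega

-- key block lemma: Python's reverse-sorted filter equals the counting-sort block over descending codes
theorem pv_block (cs : List Char) (q : Char → Bool) (codes : List Nat)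
    (hpw : codes.Pairwise (· > ·))
    (hlt : ∀ k ∈ codes, k < 128)
    (hmem : ∀ c : Char, q c = true → c ∈ cs → c.toNat ∈ codes)
    (hq : ∀ k ∈ codes, q (Char.ofNat k) = true) :
    PySem.List.sorted (cs.filter q) (fun c => c) true
    = codes.flatMap fun k => List.replicate (PySem.List.count cs (Char.ofNat k)) (Char.ofNat k) := by
  have hnd : codes.Nodup := hpw.imp (fun h => Nat.ne_of_gt h)
  apply PySem.List.eq_of_perm_of_pairwise_le_of_injective
    (fun c : Char => -((c.toNat : Int))) pv_key_injective
  · refine (PySem.List.sorted_perm _ _ _).trans ?_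
    rw [List.perm_iff_count]
    intro x
    rw [pv_count_flatMap cs x codes hnd hlt, PySem.List.count_eq]
    by_cases hin : x.toNat ∈ codes
    · have hqx : q x = true := by
        have := hq x.toNat hin
        rwa [Char.ofNat_toNat] at this
      simp [hin, List.count_filter hqx]
    · simp only [hin, if_false]
      rw [List.count_eq_zero]
      intro hmemf
      rcases List.mem_filter.mp hmemf with ⟨hxc, hqx⟩
      exact hin (hmem x hqx hxc)
  · refine (PySem.List.sorted_pairwise_rev (cs.filter q) (fun c => c)).imp ?_
    intro a b h
    have : b.toNat ≤ a.toNat := Fin.mk_le_mk.mp h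
    omega
  · exact pv_pairwise_flatMap cs codes hpw hlt

theorem pv_codes1_pairwise :
    (((List.range 128).reverse).filter (fun k => !PySem.Chars.isupper (Char.ofNat k))).Pairwise (· > ·) := by
  apply List.Pairwise.filter
  rw [List.pairwise_reverse]
  exact List.pairwise_lt_range

theorem pv_codes2_pairwise :
    (((List.range 128).reverse).filter (fun k => PySem.Chars.isupper (Char.ofNat k))).Pairwise (· > ·) := by
  apply List.Pairwise.filter
  rw [List.pairwise_reverse]
  exact List.pairwise_lt_range

theorem pv_pyRange1 :
    PySem.List.pyRange 127 (-1) (-1)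
    = ((List.range 128).reverse).map (fun k : Nat => (k : Int)) := by decide

theorem pv_pyRange2 :
    PySem.List.pyRange 90 64 (-1)
    = (((List.range 128).reverse).filter (fun k => PySem.Chars.isupper (Char.ofNat k))).map
        (fun k : Nat => (k : Int)) := by decide

-- ===== VERDICT (by name: the statement is the Claim_ definition above) =====
theorem solution_spec : Claim_equal_solution := by
  intro s hdom
  unfold Spec_solution solution solution_alt
  simp only []
  set cs := s.toList with hcs
  have hdomc : ∀ c ∈ cs, c.toNat < 128 := by
    intro c hc
    have : pvDomChar c = true := by
      have := hdom
      unfold Dom_solution pvDomStr at this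
      exact List.all_eq_true.mp this c hc
    unfold pvDomChar at this
    simp only [Bool.or_eq_true, Bool.and_eq_true, decide_eq_true_eq, beq_iff_eq] at this
    omega
  -- A side: partition loop
  rw [show (0 : Int) = ((0 : Nat) : Int) by simp] at *
  rw [PySem.List.foldl_pyRange_pyGetD cs ' '
        (fun (bs : List Char × List Char) c =>
          if PySem.Chars.isupper c = true then (bs.1 ++ [c], bs.2) else (bs.1, bs.2 ++ [c]))
        ([], []) (by omega)]
  simp only [Int.toNat_natCast, List.drop_zero]
  rw [pv_partition_foldl cs [] []]
  simp only [List.nil_append]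
  -- B side: turn the two loops into flatMaps over descending code lists
  rw [pv_pyRange1, pv_pyRange2, List.foldl_map, List.foldl_map]
  simp only [Int.toNat_natCast]
  rw [pv_foldl_append_if_flatMap (fun k : Nat => !PySem.Chars.isupper (Char.ofNat k))
        (fun k : Nat => List.replicate (PySem.List.count cs (Char.ofNat k)) (Char.ofNat k))
        ((List.range 128).reverse) []]
  rw [PySem.List.foldl_append_eq_flatMap
        (fun k : Nat => List.replicate (PySem.List.count cs (Char.ofNat k)) (Char.ofNat k))]
  simp only [List.nil_append]
  -- identify the two blocks
  have hb1 := pv_block cs (fun c => !PySem.Chars.isupper c)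
      (((List.range 128).reverse).filter (fun k => !PySem.Chars.isupper (Char.ofNat k)))
      pv_codes1_pairwise
      (by intro k hk; have := (List.mem_filter.mp hk).1; simp at this; omega)
      (by intro c hqc hc
          apply List.mem_filter.mpr
          refine ⟨by simp [List.mem_reverse, List.mem_range]; exact hdomc c hc, ?_⟩
          rw [Char.ofNat_toNat]; exact hqc)
      (by intro k hk; exact (List.mem_filter.mp hk).2)
  have hb2 := pv_block cs (fun c => PySem.Chars.isupper c)
      (((List.range 128).reverse).filter (fun k => PySem.Chars.isupper (Char.ofNat k)))
      pv_codes2_pairwise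
      (by intro k hk; have := (List.mem_filter.mp hk).1; simp at this; omega)
      (by intro c hqc hc
          apply List.mem_filter.mpr
          refine ⟨by simp [List.mem_reverse, List.mem_range]; exact hdomc c hc, ?_⟩
          rw [Char.ofNat_toNat]; exact hqc)
      (by intro k hk; exact (List.mem_filter.mp hk).2)
  rw [hb1, hb2]
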